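-- pv_equiv track=rewrite | github.com/amirmasp/goo-python | basic/list1.py | front_x
-- ===== SOURCE A (Python) =====
-- def front_x(words):
--   mylist = []
--   xlist = []
--   for item in words:
--     if item.startswith('x'):
--       xlist.append(item)
--     else:
--       mylist.append(item)
--   mylist.sort()
--   xlist.sort()
--   return xlist + mylist
-- ===== SOURCE B (Python) =====
-- def front_x(words):
--   s = sorted(words)
--   return [w for w in s if w.startswith('x')] + [w for w in s if not w.startswith('x')]
-- ===== Notes on version B (the rewrite author's own statement) =====
-- stated objective: simpler
-- what changed: B sorts the whole list once and then splits the sorted list into the x-prefixed and remaining words with two comprehensions, instead of A's explicit partition loop followed by two separate sorts.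
import Mathlib
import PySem

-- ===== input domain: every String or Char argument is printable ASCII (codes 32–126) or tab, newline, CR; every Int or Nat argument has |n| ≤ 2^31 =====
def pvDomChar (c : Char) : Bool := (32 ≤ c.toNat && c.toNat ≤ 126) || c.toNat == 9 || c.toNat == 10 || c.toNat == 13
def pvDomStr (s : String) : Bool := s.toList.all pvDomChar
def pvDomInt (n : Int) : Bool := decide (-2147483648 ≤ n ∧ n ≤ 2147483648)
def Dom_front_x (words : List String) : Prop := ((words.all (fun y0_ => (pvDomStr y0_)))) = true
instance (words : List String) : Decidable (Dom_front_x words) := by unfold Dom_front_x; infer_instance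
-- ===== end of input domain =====

-- B changes the decomposition: one sort of the whole list, then two filters over the
-- sorted list, instead of A's partition loop followed by two separate sorts.

-- ===== PORT A =====
def front_x (words : List String) : List String :=
  let st := words.foldl
    (fun (acc : List String × List String) item =>
      if PySem.Str.startswith item "x" then (acc.1, acc.2 ++ [item])
      else (acc.1 ++ [item], acc.2))
    ([], [])
  PySem.List.sorted st.2 (fun x => x) false ++ PySem.List.sorted st.1 (fun x => x) false

-- ===== PORT B =====
def front_x_alt (words : List String) : List String :=
  let s := PySem.List.sorted words (fun x => x) false
  s.filter (fun w => PySem.Str.startswith w "x")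
    ++ s.filter (fun w => !PySem.Str.startswith w "x")

-- ===== PRECONDITION & SPEC =====
def Spec_front_x (words : List String) (out : List String) : Prop := out = front_x_alt words
instance (words : List String) (out : List String) : Decidable (Spec_front_x words out) := by unfold Spec_front_x; infer_instance

-- ===== CLAIM (what is proved, stated in full; the proofs are below) =====
def Claim_equal_front_x : Prop := ∀ (words : List String), Dom_front_x words → Spec_front_x words (front_x words)

-- ===== LEMMAS AND PROOFS =====

-- A's partition loop builds (non-x words, x words) = the two filters of the input.
theorem front_x_partition (p : String → Bool) (words a b : List String) :
    words.foldl
      (fun (acc : List String × List String) item =>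
        if p item then (acc.1, acc.2 ++ [item]) else (acc.1 ++ [item], acc.2))
      (a, b)
    = (a ++ words.filter (fun w => !p w), b ++ words.filter p) := by
  induction words generalizing a b with
  | nil => simp
  | cons x xs ih =>
    by_cases h : p x = true <;> simp [List.foldl_cons, h, ih]

-- Sorting a filtered list = filtering the sorted list (identity key, strings).
theorem sorted_filter_comm (p : String → Bool) (words : List String) :
    PySem.List.sorted (words.filter p) (fun x => x) false
      = (PySem.List.sorted words (fun x => x) false).filter p := by
  apply PySem.List.sorted_id_eq_of_perm_of_pairwise
  · exact (PySem.List.sorted_perm words (fun x => x) false).filter p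
  · exact (PySem.List.sorted_pairwise words (fun x => x)).sublist
      List.filter_sublist

-- ===== VERDICT (by name: the statement is the Claim_ definition above) =====
theorem front_x_spec : Claim_equal_front_x := by
  intro words _
  unfold Spec_front_x front_x front_x_alt
  simp only [front_x_partition, List.nil_append]
  rw [← sorted_filter_comm, ← sorted_filter_comm]
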